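-- pv_equiv track=rewrite | github.com/anikom15/scanline-classic | scripts/lint_shaders.py | lift_insertion_out_of_preprocessor_block
-- ===== SOURCE A (Python) =====
-- def preprocessor_depths(lines: list[str]) -> list[int]:
--     """Return active preprocessor conditional depth for each source line."""
--     depths: list[int] = []
--     depth = 0
--     for line in lines:
--         stripped = line.strip()
--         if stripped.startswith("#endif"):
--             depth = max(0, depth - 1)
--
--         depths.append(depth)
--
--         if stripped.startswith("#if") or stripped.startswith("#ifdef") or stripped.startswith("#ifndef"):
--             depth += 1
--
--     return depths
--
-- def lift_insertion_out_of_preprocessor_block(lines: list[str], insert_at: int) -> int: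
--     """Shift insertion index upward to avoid writing inside #if/#ifdef blocks."""
--     if not lines:
--         return 0
--
--     idx = max(0, min(insert_at, len(lines)))
--     if idx >= len(lines):
--         return idx
--
--     depths = preprocessor_depths(lines)
--     while idx > 0 and depths[idx] > 0:
--         idx -= 1
--     return idx
-- ===== SOURCE B (Python) =====
-- def lift_insertion_out_of_preprocessor_block(lines: list[str], insert_at: int) -> int:
--     """Shift insertion index upward to avoid writing inside #if/#ifdef blocks.
--
--     Single forward scan: no depth table; tracks the last zero-depth index."""
--     if not lines:
--         return 0
--     n = len(lines)
--     idx = max(0, min(insert_at, n))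
--     if idx >= n:
--         return idx
--     depth = 0
--     ans = 0
--     for i, line in enumerate(lines[:idx + 1]):
--         s = line.strip()
--         if s.startswith("#endif"):
--             depth = max(0, depth - 1)
--         if depth == 0:
--             ans = i
--         if s.startswith("#if"):
--             depth += 1
--     return ans
-- ===== Notes on version B (the rewrite author's own statement) =====
-- stated objective: simpler
-- what changed: Replaces A's two-pass scheme (build a full per-line depth table with a helper, then walk backward from idx) by a single forward scan over lines[:idx+1] that keeps only a running depth and remembers the last zero-depth index.
import Mathlib
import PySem

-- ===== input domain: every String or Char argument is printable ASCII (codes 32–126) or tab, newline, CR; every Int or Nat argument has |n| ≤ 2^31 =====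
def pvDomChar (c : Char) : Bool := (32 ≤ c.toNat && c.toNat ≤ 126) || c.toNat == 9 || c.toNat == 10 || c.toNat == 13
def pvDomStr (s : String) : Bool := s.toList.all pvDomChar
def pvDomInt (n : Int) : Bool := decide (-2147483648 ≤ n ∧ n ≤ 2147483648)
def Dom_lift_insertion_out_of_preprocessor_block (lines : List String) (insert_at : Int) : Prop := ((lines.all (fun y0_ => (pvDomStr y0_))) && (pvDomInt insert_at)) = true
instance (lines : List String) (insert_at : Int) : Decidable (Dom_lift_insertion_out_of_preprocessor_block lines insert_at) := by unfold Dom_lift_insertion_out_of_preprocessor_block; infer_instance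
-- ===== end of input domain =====

-- B replaces A's two-pass scheme (build a full depth table, then walk backward from idx)
-- with one forward scan up to idx that keeps only a running depth and the last zero-depth
-- index; objective: simpler (no depth table, one loop).

-- ===== PORT A =====
-- helper of A: builds the per-line depth table (list append in a loop, as in the Python)
def depthsStep (st : List Int × Int) (line : String) : List Int × Int :=
  let stripped := PySem.Str.strip line
  let depth := if PySem.Str.startswith stripped "#endif" then max 0 (st.2 - 1) else st.2
  let depths := st.1 ++ [depth]
  let depth' := if PySem.Str.startswith stripped "#if" || PySem.Str.startswith stripped "#ifdef"
                   || PySem.Str.startswith stripped "#ifndef" then depth + 1 else depth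
  (depths, depth')

def preprocessor_depths (lines : List String) : List Int :=
  (lines.foldl depthsStep ([], 0)).1

-- A's while loop 'while idx > 0 and depths[idx] > 0: idx -= 1', recursion on the Nat index.
-- depths.getD _ 0 is exact here: the loop only reads in-range indices (idx < len(lines)).
def liftWhileA (depths : List Int) : Nat → Int
  | 0 => 0
  | n+1 => if 0 < depths.getD (n+1) 0 then liftWhileA depths n else ((n : Int) + 1)

def lift_insertion_out_of_preprocessor_block (lines : List String) (insert_at : Int) : Int :=
  if lines = [] then 0
  else
    let idx := max 0 (min insert_at (lines.length : Int))
    if idx ≥ (lines.length : Int) then idx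
    else liftWhileA (preprocessor_depths lines) idx.toNat

-- ===== PORT B =====
-- one step of B's forward scan: state = (running depth, last zero-depth index)
def scanStep (st : Int × Int) (p : Int × String) : Int × Int :=
  let s := PySem.Str.strip p.2
  let depth := if PySem.Str.startswith s "#endif" then max 0 (st.1 - 1) else st.1
  let ans := if depth = 0 then p.1 else st.2
  let depth' := if PySem.Str.startswith s "#if" then depth + 1 else depth
  (depth', ans)

def lift_insertion_out_of_preprocessor_block_alt (lines : List String) (insert_at : Int) : Int :=
  if lines = [] then 0
  else
    let n : Int := lines.length
    let idx := max 0 (min insert_at n)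
    if idx ≥ n then idx
    else
      ((PySem.List.enumerate (PySem.List.slice lines none (some (idx + 1))) 0).foldl
        scanStep (0, 0)).2

-- ===== PRECONDITION & SPEC =====
def Spec_lift_insertion_out_of_preprocessor_block (lines : List String) (insert_at : Int) (out : Int) : Prop := out = lift_insertion_out_of_preprocessor_block_alt lines insert_at
instance (lines : List String) (insert_at : Int) (out : Int) : Decidable (Spec_lift_insertion_out_of_preprocessor_block lines insert_at out) := by unfold Spec_lift_insertion_out_of_preprocessor_block; infer_instance

-- ===== CLAIM (what is proved, stated in full; the proofs are below) =====
def Claim_equal_lift_insertion_out_of_preprocessor_block : Prop := ∀ (lines : List String) (insert_at : Int), Dom_lift_insertion_out_of_preprocessor_block lines insert_at → Spec_lift_insertion_out_of_preprocessor_block lines insert_at (lift_insertion_out_of_preprocessor_block lines insert_at)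

-- ===== LEMMAS AND PROOFS =====

-- recorded depth for one line, and the depth carried to the next line
def recD (d : Int) (l : String) : Int :=
  if PySem.Str.startswith (PySem.Str.strip l) "#endif" then max 0 (d - 1) else d

def nxtD (d : Int) (l : String) : Int :=
  if PySem.Str.startswith (PySem.Str.strip l) "#if" then recD d l + 1 else recD d l

-- the depth table as a structural recursion
def dsRec (d : Int) : List String → List Int
  | [] => []
  | l :: t => recD d l :: dsRec (nxtD d l) t

-- the last index (counting from i) of a zero entry, default a
def lastZ : List Int → Int → Int → Int
  | [], a, _ => a
  | x :: t, a, i => lastZ t (if x = 0 then i else a) (i + 1)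

theorem startswith_if_collapse (s : String) :
    (PySem.Str.startswith s "#if" || PySem.Str.startswith s "#ifdef"
      || PySem.Str.startswith s "#ifndef") = PySem.Str.startswith s "#if" := by
  have key : ∀ p q : String, p.toList <+: q.toList →
      PySem.Str.startswith s q = true → PySem.Str.startswith s p = true := by
    intro p q hpq hq
    rw [PySem.Str.startswith_eq, PySem.Chars.startswith_iff] at hq ⊢
    exact hpq.trans hq
  by_cases h : PySem.Str.startswith s "#if" = true
  · rw [h, Bool.true_or, Bool.true_or]
  · have hd : PySem.Str.startswith s "#ifdef" = false := by
      rw [Bool.eq_false_iff]; intro hc; exact h (key _ _ (by decide) hc)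
    have hn : PySem.Str.startswith s "#ifndef" = false := by
      rw [Bool.eq_false_iff]; intro hc; exact h (key _ _ (by decide) hc)
    rw [Bool.not_eq_true] at h
    rw [h, hd, hn, Bool.false_or, Bool.false_or]

theorem depthsStep_eq (acc : List Int) (d : Int) (l : String) :
    depthsStep (acc, d) l = (acc ++ [recD d l], nxtD d l) := by
  simp only [depthsStep, recD, nxtD, startswith_if_collapse]

theorem foldA_eq_dsRec (ls : List String) : ∀ (acc : List Int) (d : Int),
    (ls.foldl depthsStep (acc, d)).1 = acc ++ dsRec d ls := by
  induction ls with
  | nil => intro acc d; simp [dsRec]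
  | cons l t ih =>
    intro acc d
    rw [List.foldl_cons, depthsStep_eq, ih]
    simp [dsRec]

theorem preprocessor_depths_eq (lines : List String) :
    preprocessor_depths lines = dsRec 0 lines := by
  unfold preprocessor_depths
  rw [foldA_eq_dsRec]
  simp

theorem length_dsRec (ls : List String) : ∀ d, (dsRec d ls).length = ls.length := by
  induction ls with
  | nil => intro d; simp [dsRec]
  | cons l t ih => intro d; simp [dsRec, ih]

theorem dsRec_nonneg (ls : List String) : ∀ (d : Int), 0 ≤ d → ∀ x ∈ dsRec d ls, 0 ≤ x := by
  induction ls with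
  | nil => intro d _ x hx; simp [dsRec] at hx
  | cons l t ih =>
    intro d hd x hx
    have hr : 0 ≤ recD d l := by unfold recD; split_ifs <;> omega
    simp only [dsRec, List.mem_cons] at hx
    rcases hx with h | h
    · omega
    · exact ih (nxtD d l) (by unfold nxtD; split_ifs <;> omega) x h

theorem dsRec_take (ls : List String) : ∀ (d : Int) (k : Nat),
    dsRec d (ls.take k) = (dsRec d ls).take k := by
  induction ls with
  | nil => intro d k; simp [dsRec]
  | cons l t ih =>
    intro d k
    cases k with
    | zero => simp [dsRec]
    | succ m => simp [dsRec, ih]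

theorem lastZ_append (xs ys : List Int) : ∀ (a i : Int),
    lastZ (xs ++ ys) a i = lastZ ys (lastZ xs a i) (i + xs.length) := by
  induction xs with
  | nil => intro a i; simp [lastZ]
  | cons x t ih =>
    intro a i
    simp only [List.cons_append, lastZ, ih]
    congr 1
    simp only [List.length_cons]
    push_cast
    ring

-- B's forward fold over the enumerated prefix computes lastZ of the depth table
theorem scanStep_eq (d a i : Int) (l : String) :
    scanStep (d, a) (i, l) = (nxtD d l, if recD d l = 0 then i else a) := by
  unfold scanStep recD nxtD
  rfl

theorem foldB_eq_lastZ (ls : List String) : ∀ (d a i : Int),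
    ((PySem.List.enumerate ls i).foldl scanStep (d, a)).2 = lastZ (dsRec d ls) a i := by
  induction ls with
  | nil => intro d a i; simp [PySem.List.enumerate_nil, lastZ, dsRec]
  | cons l t ih =>
    intro d a i
    rw [PySem.List.enumerate_cons, List.foldl_cons, scanStep_eq]
    simp only [dsRec, lastZ]
    exact ih _ _ _

-- A's backward walk from n is the last zero-depth index ≤ n (for a nonnegative table)
theorem liftWhileA_eq_lastZ (ds : List Int) (hpos : ∀ x ∈ ds, 0 ≤ x) :
    ∀ n : Nat, n < ds.length → liftWhileA ds n = lastZ (ds.take (n + 1)) 0 0 := by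
  intro n
  induction n with
  | zero =>
    intro hlt
    match ds, hlt with
    | x :: t, _ => simp only [liftWhileA, List.take_add_one]; simp [lastZ]
  | succ m ih =>
    intro hlt
    have hm : m < ds.length := by omega
    have hget : ds[m+1]? = some ds[m+1] := List.getElem?_eq_getElem hlt
    have hx : 0 ≤ ds[m+1] := hpos _ (List.getElem_mem hlt)
    have htake : ds.take (m + 2) = ds.take (m + 1) ++ [ds[m+1]] := by
      rw [List.take_add_one, hget]; rfl
    rw [htake, lastZ_append]
    have hlen : (ds.take (m + 1)).length = m + 1 := by
      simp; omega
    simp only [liftWhileA, List.getD_eq_getElem?_getD, hget, Option.getD_some, hlen, lastZ]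
    by_cases hz : ds[m+1] = 0
    · simp [hz]
    · simp [hz, show 0 < ds[m+1] by omega, ih hm]

-- ===== VERDICT (by name: the statement is the Claim_ definition above) =====
theorem lift_insertion_out_of_preprocessor_block_spec : Claim_equal_lift_insertion_out_of_preprocessor_block := by
  intro lines insert_at _
  unfold Spec_lift_insertion_out_of_preprocessor_block
  unfold lift_insertion_out_of_preprocessor_block lift_insertion_out_of_preprocessor_block_alt
  by_cases hnil : lines = []
  · simp [hnil]
  · simp only [hnil, if_false]
    set idx := max 0 (min insert_at (lines.length : Int)) with hidx
    by_cases hge : idx ≥ (lines.length : Int)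
    · simp [hge]
    · simp only [hge, if_false]
      have h0 : 0 ≤ idx := le_max_left _ _
      have hlt : idx < (lines.length : Int) := lt_of_not_ge hge
      have htn : idx.toNat < lines.length := by omega
      have h1 : (idx + 1).toNat = idx.toNat + 1 := by omega
      rw [PySem.List.slice_to lines (by omega : (0:Int) ≤ idx + 1)]
      rw [foldB_eq_lastZ, h1, dsRec_take]
      rw [preprocessor_depths_eq]
      exact liftWhileA_eq_lastZ (dsRec 0 lines) (dsRec_nonneg lines 0 le_rfl) idx.toNat
        (by rw [length_dsRec]; exact htn)
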